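-- pv_equiv track=rewrite | github.com/Effysayshi/Leetcode | python/String/matchAndMismatch.py | match_and_mismatch
-- ===== SOURCE A (Python) =====
-- def match_and_mismatch(str1,str2):
--     array1,array2 = str1.split(),str2.split()
--     words = {}
--     match = []
--     mismatch = []
--     for i in array1:
--         words[i] = 1
--     for j in array2:
--         if j in words:
--             words[j] = 2
--         else:
--             words[j] = 1
--     for word in words:
--         if words[word] == 2:
--             match.append(word)
--         else:
--             mismatch.append(word)
--     return match,mismatch
-- ===== SOURCE B (Python) =====
-- def match_and_mismatch(str1, str2):
--     words2 = set(str2.split())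
--     seen = set()
--     match = []
--     mismatch = []
--     for w in str1.split():
--         if w not in seen:
--             seen.add(w)
--             if w in words2:
--                 match.append(w)
--             else:
--                 mismatch.append(w)
--     for w in str2.split():
--         if w not in seen:
--             seen.add(w)
--             mismatch.append(w)
--     return match, mismatch
-- ===== Notes on version B (the rewrite author's own statement) =====
-- stated objective: alternative
-- what changed: Replaces A's staged design (mark all words in a 1/2-coded dict, then a final pass over the dict keys classifying by flag) with an online single-direction classifier: one streaming pass per string that, at each word's first occurrence (tracked by a seen-set), appends it immediately to match or mismatch, so no dict, no flag values and no post-classification pass exist.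
-- intended difference: On inputs where some word occurs at least twice in str2 and never in str1, A returns that word in the match list (its second occurrence finds the first already in the dict), while B returns it in the mismatch list, which is the intended classification for a word present in only one string. — e.g. on match_and_mismatch("a", "b b"): A returns (["b"], ["a"]), B returns ([], ["a", "b"])
import Mathlib
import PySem

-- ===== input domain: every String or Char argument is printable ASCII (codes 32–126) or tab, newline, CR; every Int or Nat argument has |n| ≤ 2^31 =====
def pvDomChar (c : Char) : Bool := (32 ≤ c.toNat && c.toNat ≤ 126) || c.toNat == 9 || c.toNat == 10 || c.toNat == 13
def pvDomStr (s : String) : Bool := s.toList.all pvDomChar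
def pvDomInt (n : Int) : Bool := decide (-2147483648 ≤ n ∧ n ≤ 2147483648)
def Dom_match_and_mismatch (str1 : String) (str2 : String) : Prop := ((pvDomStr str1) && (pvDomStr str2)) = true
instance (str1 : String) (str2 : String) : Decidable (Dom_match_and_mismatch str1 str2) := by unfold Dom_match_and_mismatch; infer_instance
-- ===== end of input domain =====

-- B replaces A's dict-flag staging with an online streaming classifier (seen-set, classify at
-- first occurrence); it intentionally differs from A on words repeating in str2 only (see D_).

-- ===== PORT A =====
def match_and_mismatch (str1 : String) (str2 : String) : List String × List String :=
  let array1 := PySem.Str.split₀ str1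
  let array2 := PySem.Str.split₀ str2
  let words : PySem.Dict String Int := array1.foldl (fun d i => d.insert i 1) PySem.Dict.empty
  let words := array2.foldl (fun d j => if d.contains j then d.insert j 2 else d.insert j 1) words
  -- 'words[word]' inside the key loop always finds the key, so getD is exact here
  words.keys.foldl
    (fun (p : List String × List String) word =>
      if words.getD word 0 == 2 then (p.1 ++ [word], p.2) else (p.1, p.2 ++ [word]))
    ([], [])

-- ===== PORT B =====
def match_and_mismatch_alt (str1 : String) (str2 : String) : List String × List String :=
  let words2 := PySem.Set.ofList (PySem.Str.split₀ str2)
  -- state: (match, mismatch, seen)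
  let st1 := (PySem.Str.split₀ str1).foldl
    (fun (st : List String × List String × PySem.Set String) w =>
      if PySem.Set.contains st.2.2 w then st
      else if PySem.Set.contains words2 w then (st.1 ++ [w], st.2.1, PySem.Set.add st.2.2 w)
      else (st.1, st.2.1 ++ [w], PySem.Set.add st.2.2 w))
    ([], [], PySem.Set.empty)
  let st2 := (PySem.Str.split₀ str2).foldl
    (fun (st : List String × List String × PySem.Set String) w =>
      if PySem.Set.contains st.2.2 w then st
      else (st.1, st.2.1 ++ [w], PySem.Set.add st.2.2 w))
    st1
  (st2.1, st2.2.1)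

-- ===== PRECONDITION & SPEC =====
-- On inputs where some word occurs at least twice in str2 and never in str1, A reports that word
-- as a "match" (its second occurrence finds the first in the dict), while B reports it as a
-- mismatch, which is the intended classification of a word occurring in only one string.
def D_match_and_mismatch (str1 : String) (str2 : String) : Prop :=
  ∃ w ∈ PySem.Str.split₀ str2,
    2 ≤ (PySem.Str.split₀ str2).count w ∧ w ∉ PySem.Str.split₀ str1
instance (str1 : String) (str2 : String) : Decidable (D_match_and_mismatch str1 str2) := by
  unfold D_match_and_mismatch; infer_instance

def Spec_match_and_mismatch (str1 : String) (str2 : String) (out : List String × List String) : Prop :=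
  ¬ D_match_and_mismatch str1 str2 → out = match_and_mismatch_alt str1 str2
instance (str1 : String) (str2 : String) (out : List String × List String) : Decidable (Spec_match_and_mismatch str1 str2 out) := by
  unfold Spec_match_and_mismatch; infer_instance

def pvDiffWitness_match_and_mismatch : String × String := ("a", "b b")
def pvDiffWitnessOut_match_and_mismatch : (List String × List String) × (List String × List String) :=
  ((["b"], ["a"]), ([], ["a", "b"]))

-- ===== CLAIM (what is proved, stated in full; the proofs are below) =====
def Claim_unchanged_match_and_mismatch : Prop := ∀ (str1 : String) (str2 : String), Dom_match_and_mismatch str1 str2 → Spec_match_and_mismatch str1 str2 (match_and_mismatch str1 str2)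
def Claim_changed_match_and_mismatch : Prop := Dom_match_and_mismatch (pvDiffWitness_match_and_mismatch.1) (pvDiffWitness_match_and_mismatch.2) ∧ D_match_and_mismatch (pvDiffWitness_match_and_mismatch.1) (pvDiffWitness_match_and_mismatch.2) ∧ match_and_mismatch (pvDiffWitness_match_and_mismatch.1) (pvDiffWitness_match_and_mismatch.2) = pvDiffWitnessOut_match_and_mismatch.1 ∧ match_and_mismatch_alt (pvDiffWitness_match_and_mismatch.1) (pvDiffWitness_match_and_mismatch.2) = pvDiffWitnessOut_match_and_mismatch.2 ∧ pvDiffWitnessOut_match_and_mismatch.1 ≠ pvDiffWitnessOut_match_and_mismatch.2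
def Claim_exact_match_and_mismatch : Prop := ∀ (str1 : String) (str2 : String), Dom_match_and_mismatch str1 str2 → D_match_and_mismatch str1 str2 → match_and_mismatch str1 str2 ≠ match_and_mismatch_alt str1 str2

-- ===== LEMMAS AND PROOFS =====

-- the per-word test A's final dict encodes, spelled on the input lists
def pvCondA (a1 a2 : List String) (w : String) : Bool :=
  decide (w ∈ a2) && (decide (w ∈ a1) || decide (2 ≤ a2.count w))

-- the intended per-word test (word in both strings)
def pvCondB (a1 a2 : List String) (w : String) : Bool :=
  decide (w ∈ a1) && decide (w ∈ a2)

-- value of a key after A's first loop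
theorem pvGetD_fold1 (xs : List String) (d : PySem.Dict String Int) (k : String) :
    (xs.foldl (fun d i => d.insert i 1) d).getD k 0
      = if k ∈ xs then 1 else d.getD k 0 := by
  induction xs generalizing d with
  | nil => simp
  | cons x rest ih =>
      simp only [List.foldl_cons, ih, PySem.Dict.getD_insert, List.mem_cons]
      by_cases hkr : k ∈ rest <;> by_cases hkx : k = x <;> simp [hkr, hkx]

-- membership of a key after A's first loop
theorem pvContains_fold1 (xs : List String) (k : String) :
    ((xs.foldl (fun d i => d.insert i 1) (PySem.Dict.empty : PySem.Dict String Int)).contains k)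
      = decide (k ∈ xs) := by
  by_cases h : k ∈ xs
  · simp only [h, decide_true]
    rw [PySem.Dict.contains_iff_mem_keys,
      PySem.Dict.keys_foldl_insert xs (fun _ _ => (1 : Int))]
    simpa [PySem.Dict.keys_empty, PySem.Set.update, ← PySem.Set.ofList_eq_foldl,
      PySem.Set.mem_ofList] using h
  · simp only [h, decide_false]
    rw [Bool.eq_false_iff]
    intro hc
    rw [PySem.Dict.contains_iff_mem_keys,
      PySem.Dict.keys_foldl_insert xs (fun _ _ => (1 : Int))] at hc
    simp [PySem.Dict.keys_empty, PySem.Set.update, ← PySem.Set.ofList_eq_foldl,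
      PySem.Set.mem_ofList] at hc
    exact h hc

-- A's second loop: both branches insert, so the step is one insert
theorem pvFold2_eq (xs : List String) (d : PySem.Dict String Int) :
    xs.foldl (fun d j => if d.contains j then d.insert j 2 else d.insert j 1) d
      = xs.foldl (fun d j => d.insert j (if d.contains j then (2 : Int) else 1)) d := by
  refine PySem.List.foldl_congr_mem xs _ _ d (fun acc x _ => ?_)
  by_cases h : acc.contains x <;> simp [h]

-- value of a key after A's second loop
theorem pvGetD_fold2 (xs : List String) (d : PySem.Dict String Int) (k : String) :
    (xs.foldl (fun d j => if d.contains j then d.insert j 2 else d.insert j 1) d).getD k 0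
      = if k ∈ xs then (if d.contains k = true ∨ 2 ≤ xs.count k then (2 : Int) else 1)
        else d.getD k 0 := by
  induction xs generalizing d with
  | nil => simp
  | cons x rest ih =>
      simp only [List.foldl_cons]
      by_cases hdx : d.contains x
      · simp only [hdx, if_true, ih, PySem.Dict.getD_insert, PySem.Dict.contains_insert,
          List.mem_cons, List.count_cons]
        by_cases hkx : k = x
        · subst hkx
          by_cases hkr : k ∈ rest <;> simp [hkr, hdx]
        · have hxk : ¬ x = k := fun h => hkx h.symm
          by_cases hkr : k ∈ rest <;> simp [hkx, hxk, hkr]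
      · simp only [hdx, Bool.false_eq_true, if_false, ih, PySem.Dict.getD_insert,
          PySem.Dict.contains_insert, List.mem_cons, List.count_cons]
        by_cases hkx : k = x
        · subst hkx
          by_cases hkr : k ∈ rest
          · have hc : 1 ≤ rest.count k := List.count_pos_iff.mpr hkr
            simp only [hkr, if_true, hdx, Bool.false_eq_true, false_or]
            have h2 : 2 ≤ rest.count k + 1 := by omega
            by_cases hcc : 2 ≤ rest.count k <;> simp [hcc, h2]
          · simp [hkr, hdx]
        · have hxk : ¬ x = k := fun h => hkx h.symm
          by_cases hkr : k ∈ rest <;> simp [hkx, hxk, hkr]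

-- keys of A's dict after both loops = ordered dedup of all words
theorem pvKeys_final (a1 a2 : List String) :
    ((a2.foldl (fun d j => if d.contains j then d.insert j 2 else d.insert j 1)
        (a1.foldl (fun d i => d.insert i 1) (PySem.Dict.empty : PySem.Dict String Int)))).keys
      = PySem.Set.ofList (a1 ++ a2) := by
  rw [pvFold2_eq]
  rw [PySem.Dict.keys_foldl_insert a2 (fun d j => if d.contains j then (2 : Int) else 1)]
  rw [PySem.Dict.keys_foldl_insert a1 (fun _ _ => (1 : Int))]
  simp only [PySem.Dict.keys_empty, PySem.Set.ofList_eq_foldl, List.foldl_append]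
  rfl

-- a pair-accumulating append fold splits into two filters
theorem pvPairFold (p : String → Bool) (xs : List String) (a b : List String) :
    xs.foldl (fun (acc : List String × List String) x =>
        if p x then (acc.1 ++ [x], acc.2) else (acc.1, acc.2 ++ [x])) (a, b)
      = (a ++ xs.filter p, b ++ xs.filter (fun x => !p x)) := by
  induction xs generalizing a b with
  | nil => simp
  | cons x rest ih =>
      by_cases h : p x <;> simp [h, ih]

-- A's result, as two filters of the ordered set of all words
theorem pvA_eq_filters (str1 str2 : String) :
    match_and_mismatch str1 str2
      = ((PySem.Set.ofList (PySem.Str.split₀ str1 ++ PySem.Str.split₀ str2)).filter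
            (pvCondA (PySem.Str.split₀ str1) (PySem.Str.split₀ str2)),
         (PySem.Set.ofList (PySem.Str.split₀ str1 ++ PySem.Str.split₀ str2)).filter
            (fun w => !pvCondA (PySem.Str.split₀ str1) (PySem.Str.split₀ str2) w)) := by
  unfold match_and_mismatch
  simp only []
  rw [pvKeys_final, pvPairFold]
  simp only [List.nil_append, Prod.mk.injEq]
  constructor <;>
  · apply List.filter_congr
    intro w hw
    have hw' : w ∈ PySem.Str.split₀ str1 ++ PySem.Str.split₀ str2 :=
      (PySem.Set.mem_ofList _ _).mp hw
    have hval := pvGetD_fold2 (PySem.Str.split₀ str2)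
      ((PySem.Str.split₀ str1).foldl (fun d i => d.insert i 1) PySem.Dict.empty) w
    rw [pvContains_fold1, pvGetD_fold1] at hval
    simp only [PySem.Dict.getD_empty] at hval
    by_cases h2 : w ∈ PySem.Str.split₀ str2
    · by_cases h1 : w ∈ PySem.Str.split₀ str1
      · simp [hval, h1, h2, pvCondA]
      · by_cases hc : 2 ≤ (PySem.Str.split₀ str2).count w
        · simp [hval, h1, h2, hc, pvCondA]
        · simp [hval, h1, h2, hc, pvCondA]
    · have h1 : w ∈ PySem.Str.split₀ str1 := by
        rcases List.mem_append.mp hw' with h | h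
        · exact h
        · exact absurd h h2
      simp [hval, h1, h2, pvCondA]

-- the new first occurrences B's seen-set loop encounters
def pvNew (s : PySem.Set String) : List String → List String
  | [] => []
  | x :: r => if PySem.Set.contains s x then pvNew s r else x :: pvNew (PySem.Set.add s x) r

-- pvNew = the ordered set of xs minus what is already seen
theorem pvContainsD (s : PySem.Set String) (x : String) :
    PySem.Set.contains s x = decide (x ∈ s) := by
  simp

theorem pvNew_eq (xs : List String) (s : PySem.Set String) :
    pvNew s xs = (PySem.Set.ofList xs).filter (fun y => !PySem.Set.contains s y) := by
  induction xs generalizing s with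
  | nil => rfl
  | cons x r ih =>
      rw [PySem.Set.ofList_cons]
      by_cases hx : x ∈ s
      · simp only [pvNew, pvContainsD, hx, decide_true, if_true, ih, List.filter_cons,
          Bool.not_true, Bool.false_eq_true, if_false]
        rw [PySem.Set.discard, List.filter_filter]
        apply List.filter_congr
        intro y _
        by_cases hys : y ∈ s
        · simp [hys]
        · by_cases hyx : y = x
          · subst hyx; exact absurd hx hys
          · simp [hys, hyx]
      · simp only [pvNew, pvContainsD, hx, decide_false, Bool.false_eq_true, if_false, ih,
          List.filter_cons, Bool.not_false, if_true, List.cons.injEq, true_and]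
        rw [PySem.Set.discard, List.filter_filter]
        apply List.filter_congr
        intro y _
        rw [PySem.Set.add_of_not_mem hx]
        by_cases hys : y ∈ s
        · have h2 : y ∈ s ++ [x] := List.mem_append.mpr (Or.inl hys)
          simp [hys, h2]
        · by_cases hyx : y = x
          · subst hyx
            have h2 : y ∈ s ++ [y] := List.mem_append.mpr (Or.inr (List.mem_singleton.mpr rfl))
            simp [hys, h2]
          · have h2 : y ∉ s ++ [x] := by
              intro h
              rcases List.mem_append.mp h with h | h
              · exact hys h
              · exact hyx (List.mem_singleton.mp h)
            simp [hys, h2, hyx]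

-- B's first loop, in closed form
theorem pvLoop1 (p : String → Bool) (xs : List String) (m mm : List String)
    (s : PySem.Set String) :
    xs.foldl
      (fun (st : List String × List String × PySem.Set String) w =>
        if PySem.Set.contains st.2.2 w then st
        else if p w then (st.1 ++ [w], st.2.1, PySem.Set.add st.2.2 w)
        else (st.1, st.2.1 ++ [w], PySem.Set.add st.2.2 w))
      (m, mm, s)
      = (m ++ (pvNew s xs).filter p, mm ++ (pvNew s xs).filter (fun w => !p w),
         PySem.Set.update s xs) := by
  induction xs generalizing m mm s with
  | nil => simp [pvNew, PySem.Set.update]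
  | cons x r ih =>
      simp only [List.foldl_cons, pvNew, PySem.Set.update_cons]
      by_cases hx : PySem.Set.contains s x
      · have hm : x ∈ s := (PySem.Set.contains_iff _ _).mp hx
        simp only [hx, if_true, ih, PySem.Set.add_of_mem hm]
      · simp only [hx, Bool.false_eq_true, if_false]
        by_cases hp : p x
        · simp only [hp, if_true]
          rw [ih]
          simp [List.filter_cons, hp]
        · simp only [hp, Bool.false_eq_true, if_false]
          rw [ih]
          simp [List.filter_cons, hp]

-- B's second loop, in closed form
theorem pvLoop2 (xs : List String) (m mm : List String) (s : PySem.Set String) :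
    xs.foldl
      (fun (st : List String × List String × PySem.Set String) w =>
        if PySem.Set.contains st.2.2 w then st
        else (st.1, st.2.1 ++ [w], PySem.Set.add st.2.2 w))
      (m, mm, s)
      = (m, mm ++ pvNew s xs, PySem.Set.update s xs) := by
  induction xs generalizing m mm s with
  | nil => simp [pvNew, PySem.Set.update]
  | cons x r ih =>
      simp only [List.foldl_cons, pvNew, PySem.Set.update_cons]
      by_cases hx : PySem.Set.contains s x
      · have hm : x ∈ s := (PySem.Set.contains_iff _ _).mp hx
        simp only [hx, if_true, ih, PySem.Set.add_of_mem hm]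
      · simp only [hx, Bool.false_eq_true, if_false]
        rw [ih]
        simp

-- membership-style contains lemmas for ofList
theorem pvContains_ofList (xs : List String) (y : String) :
    PySem.Set.contains (PySem.Set.ofList xs) y = decide (y ∈ xs) := by
  by_cases h : y ∈ xs
  · simp [h, (PySem.Set.contains_iff _ _).mpr ((PySem.Set.mem_ofList _ _).mpr h)]
  · have : PySem.Set.contains (PySem.Set.ofList xs) y = false := by
      rw [Bool.eq_false_iff]; intro hc
      exact h ((PySem.Set.mem_ofList _ _).mp ((PySem.Set.contains_iff _ _).mp hc))
    simp [h, this]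

-- B's result, in closed form over the two word lists
theorem pvB_eq (str1 str2 : String) :
    match_and_mismatch_alt str1 str2
      = ((PySem.Set.ofList (PySem.Str.split₀ str1)).filter
            (fun w => decide (w ∈ PySem.Str.split₀ str2)),
         (PySem.Set.ofList (PySem.Str.split₀ str1)).filter
            (fun w => !decide (w ∈ PySem.Str.split₀ str2))
         ++ (PySem.Set.ofList (PySem.Str.split₀ str2)).filter
            (fun w => !decide (w ∈ PySem.Str.split₀ str1))) := by
  unfold match_and_mismatch_alt
  simp only []
  rw [pvLoop1, pvLoop2]
  have hempty : ∀ y, PySem.Set.contains (PySem.Set.empty : PySem.Set String) y = false := by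
    intro y; rfl
  have h1 : pvNew PySem.Set.empty (PySem.Str.split₀ str1)
      = PySem.Set.ofList (PySem.Str.split₀ str1) := by
    rw [pvNew_eq]
    apply List.filter_eq_self.mpr
    intro y _; simp [hempty]
  have hupd : PySem.Set.update (PySem.Set.empty : PySem.Set String) (PySem.Str.split₀ str1)
      = PySem.Set.ofList (PySem.Str.split₀ str1) := by
    rw [PySem.Set.ofList_eq_foldl]; rfl
  have h2 : pvNew (PySem.Set.update (PySem.Set.empty : PySem.Set String) (PySem.Str.split₀ str1))
        (PySem.Str.split₀ str2)
      = (PySem.Set.ofList (PySem.Str.split₀ str2)).filter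
          (fun w => !decide (w ∈ PySem.Str.split₀ str1)) := by
    rw [hupd, pvNew_eq]
    apply List.filter_congr
    intro y _
    rw [pvContains_ofList]
  rw [h1, h2]
  simp only [List.nil_append, Prod.mk.injEq]
  constructor
  · apply List.filter_congr
    intro w _
    rw [pvContains_ofList]
  · congr 1
    apply List.filter_congr
    intro w _
    rw [pvContains_ofList]

-- splitting the combined ordered word set
theorem pvOfList_append (a1 a2 : List String) :
    PySem.Set.ofList (a1 ++ a2)
      = PySem.Set.ofList a1
        ++ (PySem.Set.ofList a2).filter (fun y => !PySem.Set.contains (PySem.Set.ofList a1) y) := by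
  rw [PySem.Set.ofList_append, PySem.Set.update_eq_append_filter]

-- outside D_, the two per-word tests agree
theorem pvCond_agree (str1 str2 : String) (hD : ¬ D_match_and_mismatch str1 str2)
    (w : String) :
    pvCondA (PySem.Str.split₀ str1) (PySem.Str.split₀ str2) w
      = pvCondB (PySem.Str.split₀ str1) (PySem.Str.split₀ str2) w := by
  unfold D_match_and_mismatch at hD
  push Not at hD
  by_cases h2 : w ∈ PySem.Str.split₀ str2
  · by_cases h1 : w ∈ PySem.Str.split₀ str1
    · simp [pvCondA, pvCondB, h1, h2]
    · have := hD w h2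
      have hc : ¬ 2 ≤ (PySem.Str.split₀ str2).count w := fun hc => h1 (this hc)
      simp [pvCondA, pvCondB, h1, h2, hc]
  · simp [pvCondA, pvCondB, h2]

-- ===== VERDICT (by name: the statement is the Claim_ definition above) =====
theorem match_and_mismatch_spec : Claim_unchanged_match_and_mismatch := by
  intro str1 str2 _ hD
  rw [pvA_eq_filters, pvB_eq ]
  have hcond : ∀ w, pvCondA (PySem.Str.split₀ str1) (PySem.Str.split₀ str2) w
      = pvCondB (PySem.Str.split₀ str1) (PySem.Str.split₀ str2) w :=
    pvCond_agree str1 str2 hD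
  rw [pvOfList_append]
  simp only [List.filter_append, Prod.mk.injEq]
  constructor
  · have hleft : (PySem.Set.ofList (PySem.Str.split₀ str1)).filter
        (pvCondA (PySem.Str.split₀ str1) (PySem.Str.split₀ str2))
        = (PySem.Set.ofList (PySem.Str.split₀ str1)).filter
            (fun w => decide (w ∈ PySem.Str.split₀ str2)) := by
      apply List.filter_congr
      intro w hw
      have h1 : w ∈ PySem.Str.split₀ str1 := (PySem.Set.mem_ofList _ _).mp hw
      rw [hcond]
      simp [pvCondB, h1]
    have hright : ((PySem.Set.ofList (PySem.Str.split₀ str2)).filter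
          (fun y => !PySem.Set.contains (PySem.Set.ofList (PySem.Str.split₀ str1)) y)).filter
        (pvCondA (PySem.Str.split₀ str1) (PySem.Str.split₀ str2)) = [] := by
      rw [List.filter_filter]
      apply List.filter_eq_nil_iff.mpr
      intro y _
      simp only [hcond]
      by_cases h1 : y ∈ PySem.Str.split₀ str1 <;>
        simp [pvCondB, h1]
    rw [hleft, hright, List.append_nil]
  · have hleft : (PySem.Set.ofList (PySem.Str.split₀ str1)).filter
        (fun w => !pvCondA (PySem.Str.split₀ str1) (PySem.Str.split₀ str2) w)
        = (PySem.Set.ofList (PySem.Str.split₀ str1)).filter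
            (fun w => !decide (w ∈ PySem.Str.split₀ str2)) := by
      apply List.filter_congr
      intro w hw
      have h1 : w ∈ PySem.Str.split₀ str1 := (PySem.Set.mem_ofList _ _).mp hw
      rw [hcond]
      simp [pvCondB, h1]
    have hright : ((PySem.Set.ofList (PySem.Str.split₀ str2)).filter
          (fun y => !PySem.Set.contains (PySem.Set.ofList (PySem.Str.split₀ str1)) y)).filter
        (fun w => !pvCondA (PySem.Str.split₀ str1) (PySem.Str.split₀ str2) w)
        = (PySem.Set.ofList (PySem.Str.split₀ str2)).filter
            (fun w => !decide (w ∈ PySem.Str.split₀ str1)) := by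
      rw [List.filter_filter]
      apply List.filter_congr
      intro y _
      simp only [hcond]
      by_cases h1 : y ∈ PySem.Str.split₀ str1 <;>
        simp [pvCondB, h1]
    rw [hleft, hright]

theorem match_and_mismatch_changed : Claim_changed_match_and_mismatch := by
  unfold Claim_changed_match_and_mismatch; decide

theorem match_and_mismatch_tight : Claim_exact_match_and_mismatch := by
  intro str1 str2 _ hD heq
  obtain ⟨w, hw2, hcount, hw1⟩ := hD
  have hmem : w ∈ PySem.Set.ofList (PySem.Str.split₀ str1 ++ PySem.Str.split₀ str2) := by
    rw [PySem.Set.mem_ofList]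
    exact List.mem_append.mpr (Or.inr hw2)
  have hA : w ∈ (match_and_mismatch str1 str2).1 := by
    rw [pvA_eq_filters]
    exact List.mem_filter.mpr ⟨hmem, by simp [pvCondA, hw1, hw2, hcount]⟩
  rw [heq, pvB_eq] at hA
  have := (List.mem_filter.mp hA).1
  exact hw1 ((PySem.Set.mem_ofList _ _).mp this)
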